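-- pv_equiv track=rewrite | github.com/artemarnautov/eyye-tg-bot | src/webapp_backend/cards_service_vector.py | _diversify_ranked
-- ===== SOURCE A (Python) =====
-- from typing import Any, Dict, List, Optional, Tuple
--
-- def _diversify_ranked(
--     ordered_ids: List[int],
--     cards_by_id: Dict[int, Dict[str, Any]],
--     limit: int,
--     max_same_source_in_row: int = 2,
-- ) -> List[int]:
--     out: List[int] = []
--     last_source: Optional[str] = None
--     streak = 0
--
--     for cid in ordered_ids:
--         c = cards_by_id.get(cid)
--         if not c:
--             continue
--         src = c.get("source_type") or "unknown"
--
--         if last_source == src: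
--             if streak >= max_same_source_in_row:
--                 continue
--             streak += 1
--         else:
--             last_source = src
--             streak = 1
--
--         out.append(cid)
--         if len(out) >= limit:
--             break
--     return out
-- ===== SOURCE B (Python) =====
-- from typing import Any, Dict, List, Tuple
--
-- def _diversify_ranked(
--     ordered_ids: List[int],
--     cards_by_id: Dict[int, Dict[str, Any]],
--     limit: int,
--     max_same_source_in_row: int = 2,
-- ) -> List[int]:
--     # Resolve sources once, dropping ids with no (or empty) card.
--     pairs: List[Tuple[int, str]] = []
--     for cid in ordered_ids:
--         c = cards_by_id.get(cid)
--         if c: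
--             pairs.append((cid, c.get("source_type") or "unknown"))
--
--     # At least one item of each consecutive run is always taken.
--     cap = max(1, max_same_source_in_row)
--
--     out: List[int] = []
--     i, n = 0, len(pairs)
--     while i < n:
--         src = pairs[i][1]
--         j = i
--         while j < n and pairs[j][1] == src:
--             j += 1
--         for cid, _ in pairs[i:j][:cap]:
--             out.append(cid)
--             if len(out) >= limit:
--                 return out
--         i = j
--     return out
-- ===== Notes on version B (the rewrite author's own statement) =====
-- stated objective: alternative
-- what changed: Replaces the per-item last_source/streak state machine with a filter-then-group pass: resolve (id, source) pairs once, scan each maximal run of equal sources with two pointers, and emit at most max(1, max_same_source_in_row) ids per run with the same append-then-break limit check.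
import Mathlib
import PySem

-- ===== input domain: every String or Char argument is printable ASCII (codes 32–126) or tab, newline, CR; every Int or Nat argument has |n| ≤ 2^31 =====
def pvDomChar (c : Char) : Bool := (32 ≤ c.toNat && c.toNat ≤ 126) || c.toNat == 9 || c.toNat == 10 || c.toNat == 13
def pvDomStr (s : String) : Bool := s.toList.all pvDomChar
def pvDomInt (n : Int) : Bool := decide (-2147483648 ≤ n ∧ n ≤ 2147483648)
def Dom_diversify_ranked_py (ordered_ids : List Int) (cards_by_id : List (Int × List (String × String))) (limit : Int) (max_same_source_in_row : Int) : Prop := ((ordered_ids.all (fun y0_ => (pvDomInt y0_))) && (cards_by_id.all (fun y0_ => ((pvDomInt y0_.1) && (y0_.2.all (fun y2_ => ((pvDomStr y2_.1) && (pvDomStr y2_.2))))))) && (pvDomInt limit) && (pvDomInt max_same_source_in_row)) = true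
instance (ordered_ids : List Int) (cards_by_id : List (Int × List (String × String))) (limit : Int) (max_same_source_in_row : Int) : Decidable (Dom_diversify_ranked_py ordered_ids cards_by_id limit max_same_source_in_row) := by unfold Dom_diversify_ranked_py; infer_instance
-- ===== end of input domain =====

-- B replaces A's last_source/streak state machine by a filter-then-group-runs pass (alternative decomposition, same cost).

-- shared helpers: dict lookup on an association list (first match) and the
-- `c.get("source_type") or "unknown"` source coercion both Pythons perform
def assocGet {α β : Type} [BEq α] (d : List (α × β)) (k : α) : Option β :=
  (d.find? (fun p => p.1 == k)).map (·.2)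

def srcOf (c : List (String × String)) : String :=
  match assocGet c "source_type" with
  | none => "unknown"
  | some v => if v = "" then "unknown" else v

-- ===== PORT A =====
-- the for-loop with state (out, last_source, streak); break = returning out'
def aLoop (cards_by_id : List (Int × List (String × String))) (limit mx : Int) :
    List Int → List Int → Option String → Int → List Int
  | [], out, _, _ => out
  | cid :: rest, out, last, streak =>
    match assocGet cards_by_id cid with
    | none => aLoop cards_by_id limit mx rest out last streak        -- `if not c: continue` (missing)
    | some c =>
      if c = [] then aLoop cards_by_id limit mx rest out last streak -- `if not c: continue` (empty dict)
      else
        let src := srcOf c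
        if last = some src then
          if streak ≥ mx then aLoop cards_by_id limit mx rest out last streak
          else
            let out' := out ++ [cid]
            if (out'.length : Int) ≥ limit then out'
            else aLoop cards_by_id limit mx rest out' last (streak + 1)
        else
          let out' := out ++ [cid]
          if (out'.length : Int) ≥ limit then out'
          else aLoop cards_by_id limit mx rest out' (some src) 1

def diversify_ranked_py (ordered_ids : List Int) (cards_by_id : List (Int × List (String × String))) (limit : Int) (max_same_source_in_row : Int) : List Int :=
  aLoop cards_by_id limit max_same_source_in_row ordered_ids [] none 0

-- ===== PORT B =====
-- pass 1 of Source B: resolve (cid, src) pairs, dropping ids with no / empty card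
def bPairs (cards_by_id : List (Int × List (String × String))) : List Int → List (Int × String)
  | [] => []
  | cid :: rest =>
    match assocGet cards_by_id cid with
    | none => bPairs cards_by_id rest
    | some c =>
      if c = [] then bPairs cards_by_id rest
      else (cid, srcOf c) :: bPairs cards_by_id rest

-- Source B's inner `for cid, _ in pairs[i:j][:cap]` with the early `return out`: Bool = returned
def bInner (limit : Int) : List (Int × String) → List Int → List Int × Bool
  | [], out => (out, false)
  | (cid, _) :: rest, out =>
    let out' := out ++ [cid]
    if (out'.length : Int) ≥ limit then (out', true) else bInner limit rest out'

-- Source B's outer while: the inner `while j < n and pairs[j][1] == src` run scan is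
-- takeWhile/dropWhile on the suffix; pairs[i:j][:cap] = run.take cap (cap ≥ 1)
def bLoop (limit cap : Int) : List (Int × String) → List Int → List Int
  | [], out => out
  | (cid, s) :: tl, out =>
    let run := (cid, s) :: tl.takeWhile (fun p => p.2 == s)
    let r := bInner limit (run.take cap.toNat) out
    if r.2 then r.1 else bLoop limit cap (tl.dropWhile (fun p => p.2 == s)) r.1
  termination_by ps => ps.length
  decreasing_by
    simp only [List.length_cons]
    exact Nat.lt_succ_of_le (tl.length_dropWhile_le _)

def diversify_ranked_py_alt (ordered_ids : List Int) (cards_by_id : List (Int × List (String × String))) (limit : Int) (max_same_source_in_row : Int) : List Int :=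
  bLoop limit (max 1 max_same_source_in_row) (bPairs cards_by_id ordered_ids) []

-- ===== PRECONDITION & SPEC =====
def Spec_diversify_ranked_py (ordered_ids : List Int) (cards_by_id : List (Int × List (String × String))) (limit : Int) (max_same_source_in_row : Int) (out : List Int) : Prop := out = diversify_ranked_py_alt ordered_ids cards_by_id limit max_same_source_in_row
instance (ordered_ids : List Int) (cards_by_id : List (Int × List (String × String))) (limit : Int) (max_same_source_in_row : Int) (out : List Int) : Decidable (Spec_diversify_ranked_py ordered_ids cards_by_id limit max_same_source_in_row out) := by unfold Spec_diversify_ranked_py; infer_instance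

-- ===== CLAIM (what is proved, stated in full; the proofs are below) =====
def Claim_equal_diversify_ranked_py : Prop := ∀ (ordered_ids : List Int) (cards_by_id : List (Int × List (String × String))) (limit : Int) (max_same_source_in_row : Int), Dom_diversify_ranked_py ordered_ids cards_by_id limit max_same_source_in_row → Spec_diversify_ranked_py ordered_ids cards_by_id limit max_same_source_in_row (diversify_ranked_py ordered_ids cards_by_id limit max_same_source_in_row)

-- ===== LEMMAS AND PROOFS =====

-- reference loop: A's state machine run directly over resolved (cid, src) pairs
def refL (limit mx : Int) : List (Int × String) → List Int → Option String → Int → List Int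
  | [], out, _, _ => out
  | (cid, src) :: rest, out, last, streak =>
    if last = some src then
      if streak ≥ mx then refL limit mx rest out last streak
      else
        let out' := out ++ [cid]
        if (out'.length : Int) ≥ limit then out'
        else refL limit mx rest out' last (streak + 1)
    else
      let out' := out ++ [cid]
      if (out'.length : Int) ≥ limit then out'
      else refL limit mx rest out' (some src) 1

-- A's loop = the reference loop over the resolved pairs
theorem aLoop_eq_refL (cards : List (Int × List (String × String))) (limit mx : Int)
    (ids : List Int) : ∀ out last streak,
    aLoop cards limit mx ids out last streak = refL limit mx (bPairs cards ids) out last streak := by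
  induction ids with
  | nil => intro out last streak; rfl
  | cons cid rest ih =>
    intro out last streak
    simp only [aLoop, bPairs]
    cases assocGet cards cid with
    | none => exact ih out last streak
    | some c =>
      by_cases hc : c = []
      · simp only [if_pos hc]; exact ih out last streak
      · simp only [if_neg hc, refL]
        split_ifs <;> simp [ih]

-- when the next source (if any) differs from last, the carried state is irrelevant
theorem refL_reset (limit mx : Int) (ps : List (Int × String)) (out : List Int)
    (last : Option String) (streak : Int)
    (h : ∀ p, ps.head? = some p → last ≠ some p.2) :
    refL limit mx ps out last streak = refL limit mx ps out none 0 := by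
  cases ps with
  | nil => rfl
  | cons p tl =>
    obtain ⟨cid, s⟩ := p
    have hne : last ≠ some s := h (cid, s) rfl
    simp [refL, hne]

-- run lemma: on a run of pairs all with source s, the reference loop in state
-- (some s, j) emits exactly the capped prefix bInner emits, then resets
theorem refL_run (limit mx : Int) (s : String) (run rest : List (Int × String))
    (hrest : ∀ p, rest.head? = some p → p.2 ≠ s) :
    ∀ (out : List Int) (j : Int), (∀ p ∈ run, p.2 = s) →
    refL limit mx (run ++ rest) out (some s) j =
      (let r := bInner limit (run.take (mx - j).toNat) out
       if r.2 then r.1 else refL limit mx rest r.1 none 0) := by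
  induction run with
  | nil =>
    intro out j _
    simp only [List.nil_append, List.take_nil, bInner, if_false, Bool.false_eq_true]
    exact refL_reset limit mx rest out (some s) j
      (fun p hp hc => hrest p hp (by injection hc with h; exact h.symm))
  | cons p run' ih =>
    intro out j hrun
    obtain ⟨cid, s'⟩ := p
    have hs : s' = s := hrun (cid, s') (List.mem_cons_self)
    subst hs
    have hmem : ∀ p ∈ run', p.2 = s' := fun p hp => hrun p (List.mem_cons_of_mem _ hp)
    by_cases hj : j ≥ mx
    · have h0 : (mx - j).toNat = 0 := by omega
      rw [List.cons_append, refL, if_pos rfl, if_pos hj, ih out j hmem, h0]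
      simp
    · have h1 : (mx - j).toNat = (mx - (j + 1)).toNat + 1 := by omega
      rw [List.cons_append, refL, if_pos rfl, if_neg hj, h1, List.take_succ_cons, bInner]
      by_cases hl : ((out ++ [cid]).length : Int) ≥ limit
      · rw [if_pos hl, if_pos hl]
        simp
      · rw [if_neg hl, if_neg hl, ih (out ++ [cid]) (j + 1) hmem]

-- main: the reference loop over pairs equals B's group-runs loop
theorem refL_eq_bLoop (limit mx : Int) :
    ∀ (n : Nat) (ps : List (Int × String)), ps.length ≤ n → ∀ (out : List Int),
    refL limit mx ps out none 0 = bLoop limit (max 1 mx) ps out := by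
  intro n
  induction n with
  | zero =>
    intro ps hps out
    have : ps = [] := List.eq_nil_of_length_eq_zero (Nat.le_zero.mp hps)
    subst this; rw [bLoop, refL]
  | succ n ih =>
    intro ps hps out
    cases ps with
    | nil => rw [bLoop, refL]
    | cons p tl =>
      obtain ⟨cid, s⟩ := p
      have hcap : (max 1 mx).toNat = (mx - 1).toNat + 1 := by omega
      have htw : ∀ q ∈ tl.takeWhile (fun p => p.2 == s), q.2 = s := by
        intro q hq
        have h := List.mem_takeWhile_imp hq
        exact eq_of_beq h
      have hdw : ∀ q, (tl.dropWhile (fun p => p.2 == s)).head? = some q → q.2 ≠ s := by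
        intro q hq hqs
        rw [← List.find?_not_eq_head?_dropWhile] at hq
        have h2 := List.find?_some hq
        simp [hqs] at h2
      have hlen : (tl.dropWhile (fun p => p.2 == s)).length ≤ n := by
        have h1 := tl.length_dropWhile_le (fun p => p.2 == s)
        simp only [List.length_cons] at hps
        omega
      rw [bLoop, refL, if_neg (by simp), hcap, List.take_succ_cons, bInner]
      by_cases hl : ((out ++ [cid]).length : Int) ≥ limit
      · rw [if_pos hl, if_pos hl]
        simp
      · rw [if_neg hl, if_neg hl]
        conv_lhs => rw [← List.takeWhile_append_dropWhile (p := fun p => (p.2 == s : Bool)) (l := tl)]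
        rw [refL_run limit mx s _ _ hdw (out ++ [cid]) 1 htw]
        cases hb : (bInner limit (List.take (mx - 1).toNat (tl.takeWhile (fun p => p.2 == s))) (out ++ [cid])).2 <;>
          simp only [hb, Bool.false_eq_true, if_false, if_true, ih _ hlen]

-- ===== VERDICT (by name: the statement is the Claim_ definition above) =====
theorem diversify_ranked_py_spec : Claim_equal_diversify_ranked_py := by
  intro ids cards limit mx _
  unfold Spec_diversify_ranked_py diversify_ranked_py diversify_ranked_py_alt
  rw [aLoop_eq_refL, refL_eq_bLoop limit mx (bPairs cards ids).length _ (le_refl _)]
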